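-- pv_equiv track=rewrite | github.com/ruskin23/the-vera-project | vera/core/harness.py | _count_model_switches
-- ===== SOURCE A (Python) =====
-- def _count_model_switches(turns: list[dict]) -> int:
--     switches = 0
--     prev: str | None = None
--     for t in sorted(turns, key=lambda x: x.get("ts", 0.0)):
--         m = t.get("model")
--         if m is None:
--             continue
--         if prev is not None and m != prev:
--             switches += 1
--         prev = m
--     return switches
-- ===== SOURCE B (Python) =====
-- def _count_model_switches(turns: list[dict]) -> int:
--     models = [t["model"] for t in sorted(turns, key=lambda x: x.get("ts", 0.0))
--               if t.get("model") is not None]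
--     # count maximal runs of equal consecutive models; switches = runs - 1
--     runs = 0
--     i = 0
--     n = len(models)
--     while i < n:
--         runs += 1
--         v = models[i]
--         while i < n and models[i] == v:
--             i += 1
--     return runs - 1 if runs > 0 else 0
-- ===== Notes on version B (the rewrite author's own statement) =====
-- stated objective: alternative
-- what changed: Instead of comparing each model with a running previous value, B counts the maximal runs of equal consecutive models with a nested run-skipping loop and returns runs-1.
import Mathlib
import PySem

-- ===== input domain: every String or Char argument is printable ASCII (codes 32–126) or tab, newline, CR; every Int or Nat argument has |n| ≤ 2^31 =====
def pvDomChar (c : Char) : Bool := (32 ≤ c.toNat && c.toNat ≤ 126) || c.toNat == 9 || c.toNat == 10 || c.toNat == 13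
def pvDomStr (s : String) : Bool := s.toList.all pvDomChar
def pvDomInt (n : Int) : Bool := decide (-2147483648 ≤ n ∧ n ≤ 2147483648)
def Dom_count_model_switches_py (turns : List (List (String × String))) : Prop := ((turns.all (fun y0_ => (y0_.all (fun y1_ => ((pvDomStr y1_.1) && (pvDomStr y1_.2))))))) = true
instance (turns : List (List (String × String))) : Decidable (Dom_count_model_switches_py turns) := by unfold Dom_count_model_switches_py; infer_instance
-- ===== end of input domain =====

-- B counts the maximal runs of equal consecutive models (nested run-skipping loop) and returns
-- runs-1, instead of A's running (switches, prev) accumulator; objective: alternative.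

-- ===== PORT A =====
-- Python's sort key x.get("ts", 0.0) mixes str and float; its default 0.0 is ported as the
-- constant "" (exact under Pre_, where the "ts" key is present in all turns or in none).
def count_model_switches_py (turns : List (List (String × String))) : Int :=
  ((PySem.List.sorted turns (fun x => PySem.Dict.getD (PySem.Dict.mk x) "ts" "") false).foldl
    (fun (st : Int × Option String) t =>
      match PySem.Dict.get? (PySem.Dict.mk t) "model" with
      | none => st
      | some m =>
        (match st.2 with
         | some p => if m ≠ p then st.1 + 1 else st.1
         | none => st.1, some m))
    (0, none)).1

-- ===== PORT B =====
-- inner 'while i < n and models[i] == v: i += 1' of Source B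
def pvSkipRun (v : String) : List String → List String
  | [] => []
  | x :: r => if x = v then pvSkipRun v r else x :: r

theorem pvSkipRun_length_le (v : String) : ∀ l : List String, (pvSkipRun v l).length ≤ l.length
  | [] => Nat.le_refl _
  | x :: r => by
      simp only [pvSkipRun]
      split
      · exact Nat.le_succ_of_le (pvSkipRun_length_le v r)
      · exact Nat.le_refl _

-- outer 'while i < n: runs += 1; …skip run…' of Source B
def pvRuns : List String → Int
  | [] => 0
  | v :: r => 1 + pvRuns (pvSkipRun v r)
  termination_by l => l.length
  decreasing_by exact Nat.lt_succ_of_le (pvSkipRun_length_le v r)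

def count_model_switches_py_alt (turns : List (List (String × String))) : Int :=
  let models := (PySem.List.sorted turns (fun x => PySem.Dict.getD (PySem.Dict.mk x) "ts" "") false).filterMap
      (fun t => PySem.Dict.get? (PySem.Dict.mk t) "model")
  let runs := pvRuns models
  if runs > 0 then runs - 1 else 0

-- ===== PRECONDITION & SPEC =====
-- Pre_ excludes only inputs on which A RAISES: with at least two turns, a "ts" key present in
-- some turns but missing in others makes Python's sort compare a str with the float 0.0 → TypeError.
def Pre_count_model_switches_py (turns : List (List (String × String))) : Prop :=
  (∀ t ∈ turns, PySem.Dict.contains (PySem.Dict.mk t) "ts" = true)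
  ∨ (∀ t ∈ turns, PySem.Dict.contains (PySem.Dict.mk t) "ts" = false)
  ∨ turns.length ≤ 1
instance (turns : List (List (String × String))) : Decidable (Pre_count_model_switches_py turns) := by unfold Pre_count_model_switches_py; infer_instance
def pvWitness_count_model_switches_py : (List (List (String × String))) :=
  [[("ts", "1"), ("model", "a")], [("ts", "2"), ("model", "b")], [("ts", "3"), ("model", "b")]]
def Spec_count_model_switches_py (turns : List (List (String × String))) (out : Int) : Prop := out = count_model_switches_py_alt turns
instance (turns : List (List (String × String))) (out : Int) : Decidable (Spec_count_model_switches_py turns out) := by unfold Spec_count_model_switches_py; infer_instance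

-- ===== CLAIM (what is proved, stated in full; the proofs are below) =====
def Claim_equal_count_model_switches_py : Prop := ∀ (turns : List (List (String × String))), Dom_count_model_switches_py turns → Pre_count_model_switches_py turns → Spec_count_model_switches_py turns (count_model_switches_py turns)

-- ===== LEMMAS AND PROOFS =====

-- adjacent-difference count of a list of strings (proof-side characterisation)
def pvCnt : List String → Int
  | a :: b :: r => (if a ≠ b then 1 else 0) + pvCnt (b :: r)
  | _ => 0

theorem pvCnt_nonneg : ∀ l : List String, 0 ≤ pvCnt l
  | [] => le_refl _
  | [_] => le_refl _
  | a :: b :: r => by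
      simp only [pvCnt]
      have := pvCnt_nonneg (b :: r)
      split_ifs <;> omega

theorem pvCnt_cons_skip (v : String) : ∀ r : List String, pvCnt (v :: r) = pvCnt (v :: pvSkipRun v r)
  | [] => rfl
  | x :: r => by
      by_cases h : x = v
      · subst h
        have ih := pvCnt_cons_skip x r
        have hs : pvSkipRun x (x :: r) = pvSkipRun x r := by simp [pvSkipRun]
        rw [hs]
        simpa [pvCnt] using ih
      · simp [pvSkipRun, h]

theorem pvSkipRun_head_ne (v : String) : ∀ (r : List String) (w : String) (t : List String),
    pvSkipRun v r = w :: t → w ≠ v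
  | [], _, _, h => by simp [pvSkipRun] at h
  | x :: r, w, t, h => by
      by_cases hx : x = v
      · simp only [pvSkipRun, if_pos hx] at h
        exact pvSkipRun_head_ne v r w t h
      · simp only [pvSkipRun, if_neg hx] at h
        injection h with h1 _
        rw [← h1]; exact hx

theorem pvRuns_eq_cnt : ∀ l : List String, pvRuns l = pvCnt l + (if l = [] then 0 else 1)
  | [] => by simp [pvRuns, pvCnt]
  | v :: r => by
      have hrec : pvRuns (v :: r) = 1 + pvRuns (pvSkipRun v r) := by
        rw [pvRuns]
      have ih := pvRuns_eq_cnt (pvSkipRun v r)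
      rw [hrec, ih, if_neg (by simp : ¬ v :: r = [])]
      rw [pvCnt_cons_skip v r]
      cases hs : pvSkipRun v r with
      | nil => simp [pvCnt]
      | cons w t =>
          have hw : w ≠ v := pvSkipRun_head_ne v r w t hs
          simp only [pvCnt, if_pos (Ne.symm hw), if_neg (by simp : ¬ (w :: t) = [])]
          generalize pvCnt (w :: t) = c
          omega
  termination_by l => l.length
  decreasing_by exact Nat.lt_succ_of_le (pvSkipRun_length_le v r)

theorem pvLoop_eq : ∀ (L : List (List (String × String))) (s : Int) (prev : Option String),
    (L.foldl
      (fun (st : Int × Option String) t =>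
        match PySem.Dict.get? (PySem.Dict.mk t) "model" with
        | none => st
        | some m =>
          (match st.2 with
           | some p => if m ≠ p then st.1 + 1 else st.1
           | none => st.1, some m))
      (s, prev)).1
    = s + pvCnt (prev.toList ++ L.filterMap (fun t => PySem.Dict.get? (PySem.Dict.mk t) "model")) := by
  intro L
  induction L with
  | nil => intro s prev; cases prev <;> simp [pvCnt]
  | cons t L ih =>
    intro s prev
    simp only [List.foldl_cons, List.filterMap_cons]
    cases hm : PySem.Dict.get? (PySem.Dict.mk t) "model" with
    | none => exact ih s prev
    | some m =>
      cases prev with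
      | none => rw [ih]; simp
      | some p =>
        rw [ih]
        by_cases h : m = p
        · simp [pvCnt, h]
        · simp [pvCnt, h, Ne, eq_comm]; ring

-- ===== VERDICT (by name: the statement is the Claim_ definition above) =====
theorem count_model_switches_py_spec : Claim_equal_count_model_switches_py := by
  intro turns _ _
  unfold Spec_count_model_switches_py count_model_switches_py count_model_switches_py_alt
  rw [pvLoop_eq]
  simp only [Option.toList_none, List.nil_append, zero_add]
  set ms := (PySem.List.sorted turns (fun x => PySem.Dict.getD (PySem.Dict.mk x) "ts" "") false).filterMap
      (fun t => PySem.Dict.get? (PySem.Dict.mk t) "model") with hms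
  rw [pvRuns_eq_cnt]
  have h0 := pvCnt_nonneg ms
  cases ms with
  | nil => simp [pvCnt]
  | cons a r =>
      simp only [if_neg (by simp : ¬ (a :: r) = [])]
      have := pvCnt_nonneg (a :: r)
      rw [if_pos (by omega)]
      omega
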